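-- pv_equiv track=rewrite | github.com/christopheradolphe/Python-School-Projects | Practice Exam 2015.py | almost_symmetric
-- ===== SOURCE A (Python) =====
-- def is_symmetric(L):
--     if L[:] == L[::-1]:
--         return True
--     else:
--         return False
--
-- def almost_symmetric(L):
--     if is_symmetric(L):
--         return False
--     for i in range(len(L)-1):
--         original_list = L[:]
--         L[i], L[i+1] = L[i+1], L[i]
--         if is_symmetric(L):
--             return True
--         L = original_list
--     return False
-- ===== SOURCE B (Python) =====
-- def almost_symmetric(L):
--     # Faster: find the first mismatched symmetric pair; only a swap touching
--     # that pair can help, so check at most four candidate swaps in O(n) total.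
--     # (Unlike A, does not mutate L; return value is identical.)
--     n = len(L)
--     j = next((t for t in range(n // 2) if L[t] != L[n - 1 - t]), None)
--     if j is None:
--         return False
--     k = n - 1 - j
--     def pal_after_swap(i):
--         M = L[:i] + [L[i + 1], L[i]] + L[i + 2:]
--         return M == M[::-1]
--     cands = {i for i in (j - 1, j, k - 1, k) if 0 <= i <= n - 2}
--     return any(pal_after_swap(i) for i in cands)
-- ===== Notes on version B (the rewrite author's own statement) =====
-- stated objective: faster
-- what changed: Instead of trying every adjacent swap and re-checking the whole list (O(n^2)), B finds the first mismatched symmetric pair in one pass and only tests the at-most-four adjacent swaps that touch that pair, since any other swap leaves the mismatch in place.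
import Mathlib
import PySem

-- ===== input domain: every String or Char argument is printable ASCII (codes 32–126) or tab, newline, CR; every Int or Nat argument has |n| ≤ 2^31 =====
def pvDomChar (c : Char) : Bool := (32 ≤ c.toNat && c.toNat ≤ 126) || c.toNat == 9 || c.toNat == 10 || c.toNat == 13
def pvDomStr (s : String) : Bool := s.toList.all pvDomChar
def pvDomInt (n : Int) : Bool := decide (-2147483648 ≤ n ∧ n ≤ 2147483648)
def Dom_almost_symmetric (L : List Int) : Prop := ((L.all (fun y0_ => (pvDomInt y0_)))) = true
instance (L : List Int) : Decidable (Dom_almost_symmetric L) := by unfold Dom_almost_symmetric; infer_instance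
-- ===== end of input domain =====

-- B replaces A's try-every-adjacent-swap O(n^2) scan by locating the first mismatched
-- symmetric pair and testing only the ≤4 swaps touching it (faster, asymptotic).
-- A mutates its argument in place (the first tried swap persists); the equivalence
-- proved here is about the RETURN value only.

-- ===== PORT A =====
-- is_symmetric: L[:] == L[::-1]  (slice copy = the list itself; [::-1] = reverse)
def is_symmetric (L : List Int) : Bool := if L = L.reverse then true else false

-- the simultaneous assignment L[i], L[i+1] = L[i+1], L[i]; indices are in range in A's loop
def pySwap (L : List Int) (i : Nat) : List Int :=
  (L.set i (L.getD (i+1) 0)).set (i+1) (L.getD i 0)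

-- transliteration of A: early-return loop over range(len(L)-1) = List.any; each
-- iteration swaps on a copy of the original list (A restores L each time)
def almost_symmetric (L : List Int) : Bool :=
  if is_symmetric L then false
  else (List.range (L.length - 1)).any (fun i => is_symmetric (pySwap L i))

-- ===== PORT B =====
-- M = L[:i] + [L[i+1], L[i]] + L[i+2:]
def palSwapList (L : List Int) (i : Nat) : List Int :=
  L.take i ++ [L.getD (i+1) 0, L.getD i 0] ++ L.drop (i+2)

-- transliteration of Source B: first mismatched symmetric pair via find? over range(n//2),
-- then any over the candidate set {j-1, j, k-1, k} ∩ [0, n-2] (Int, since j-1 may be -1;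
-- .dedup is Python's set construction)
def almost_symmetric_alt (L : List Int) : Bool :=
  let n := L.length
  match (List.range (n / 2)).find? (fun t => !(L.getD t 0 == L.getD (n - 1 - t) 0)) with
  | none => false
  | some j =>
      let k := n - 1 - j
      let cands := ([(j : Int) - 1, (j : Int), (k : Int) - 1, (k : Int)].filter
        (fun i => decide (0 ≤ i ∧ i ≤ (n : Int) - 2))).dedup
      cands.any (fun i => let M := palSwapList L i.toNat; decide (M = M.reverse))

-- ===== PRECONDITION & SPEC =====
def Spec_almost_symmetric (L : List Int) (out : Bool) : Prop := out = almost_symmetric_alt L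
instance (L : List Int) (out : Bool) : Decidable (Spec_almost_symmetric L out) := by unfold Spec_almost_symmetric; infer_instance

-- ===== CLAIM (what is proved, stated in full; the proofs are below) =====
def Claim_equal_almost_symmetric : Prop := ∀ (L : List Int), Dom_almost_symmetric L → Spec_almost_symmetric L (almost_symmetric L)

-- ===== LEMMAS AND PROOFS =====

lemma swap_eq_palSwapList (L : List Int) (i : Nat) (h : i + 1 < L.length) :
    pySwap L i = palSwapList L i := by
  induction i generalizing L with
  | zero => match L, h with
    | a :: b :: t, _ => simp [pySwap, palSwapList]
  | succ i ih => match L, h with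
    | a :: t, h =>
      have := ih t (by simpa using h)
      simp only [pySwap, palSwapList] at this ⊢
      simpa using this

lemma pal_iff_full (L : List Int) :
    L = L.reverse ↔ ∀ t, t < L.length → L.getD t 0 = L.getD (L.length - 1 - t) 0 := by
  constructor
  · intro h t ht
    rw [List.getD_eq_getElem?_getD, List.getD_eq_getElem?_getD]
    conv_lhs => rw [h]
    rw [List.getElem?_reverse ht]
  · intro h
    apply List.ext_getElem (by simp)
    intro t h1 h2
    rw [List.getElem_reverse]
    have := h t h1
    rw [List.getD_eq_getElem L 0 h1, List.getD_eq_getElem L 0 (by omega)] at this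
    exact this

lemma pal_iff_half (L : List Int) :
    L = L.reverse ↔ ∀ t, t < L.length / 2 → L.getD t 0 = L.getD (L.length - 1 - t) 0 := by
  rw [pal_iff_full]
  constructor
  · intro h t ht; exact h t (by omega)
  · intro h t ht
    by_cases hh : t < L.length / 2
    · exact h t hh
    · by_cases he : L.length - 1 - t = t
      · rw [he]
      · have hs : L.length - 1 - t < L.length / 2 := by omega
        have := h (L.length - 1 - t) hs
        rw [show L.length - 1 - (L.length - 1 - t) = t by omega] at this
        exact this.symm

lemma pySwap_getD_ne (L : List Int) (i t : Nat) (ht : t < L.length)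
    (h1 : t ≠ i) (h2 : t ≠ i + 1) : (pySwap L i).getD t 0 = L.getD t 0 := by
  unfold pySwap
  rw [List.getD_eq_getElem?_getD, List.getD_eq_getElem?_getD,
      List.getElem?_set_ne (by omega), List.getElem?_set_ne (by omega),
      ← List.getD_eq_getElem?_getD]

lemma swap_hit (L : List Int) (j i : Nat)
    (hj : j < L.length / 2)
    (hne : L.getD j 0 ≠ L.getD (L.length - 1 - j) 0)
    (hi : i + 1 < L.length)
    (hp : is_symmetric (pySwap L i) = true) :
    (1 ≤ j ∧ i = j - 1) ∨ i = j ∨ i = L.length - 1 - j - 1 ∨ i = L.length - 1 - j := by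
  by_contra hcon
  push Not at hcon
  obtain ⟨c1, c2, c3, c4⟩ := hcon
  have hp' : pySwap L i = (pySwap L i).reverse := by
    by_contra hne'; simp [is_symmetric, hne'] at hp
  have hlen : (pySwap L i).length = L.length := by simp [pySwap]
  have h1 := (pal_iff_full _).mp hp' j (by rw [hlen]; omega)
  rw [hlen] at h1
  rw [pySwap_getD_ne L i j (by omega) (by omega) (by omega),
      pySwap_getD_ne L i (L.length - 1 - j) (by omega) (by omega) (by omega)] at h1
  exact hne h1

theorem almost_symmetric_spec' (L : List Int) : almost_symmetric L = almost_symmetric_alt L := by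
  rcases hfind : (List.range (L.length / 2)).find?
      (fun t => !(L.getD t 0 == L.getD (L.length - 1 - t) 0)) with _ | j
  · -- no mismatch: palindrome
    have hall := List.find?_eq_none.mp hfind
    have hpal : L = L.reverse := by
      rw [pal_iff_half]
      intro t ht
      have := hall t (List.mem_range.mpr ht)
      simpa using this
    have hsym : is_symmetric L = true := by rw [is_symmetric, if_pos hpal]
    have hB : almost_symmetric_alt L = false := by
      simp only [almost_symmetric_alt]; rw [hfind]
    simp [almost_symmetric, hsym, hB]
  · have hj : j < L.length / 2 := List.mem_range.mp (List.mem_of_find?_eq_some hfind)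
    have hne : L.getD j 0 ≠ L.getD (L.length - 1 - j) 0 := by
      have := List.find?_some hfind
      simpa using this
    have hnp : ¬ (L = L.reverse) := by
      rw [pal_iff_half]; intro h; exact hne (h j hj)
    have hk1 : 1 ≤ L.length - 1 - j := by omega
    have hsym : is_symmetric L = false := by rw [is_symmetric, if_neg hnp]
    have hA : almost_symmetric L
        = (List.range (L.length - 1)).any (fun i => is_symmetric (pySwap L i)) := by
      simp [almost_symmetric, hsym]
    rw [hA]
    simp only [almost_symmetric_alt]
    rw [hfind]
    rw [Bool.eq_iff_iff]
    simp only [List.any_eq_true, List.mem_range, List.mem_dedup, List.mem_filter,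
      decide_eq_true_eq]
    constructor
    · rintro ⟨i, hi, hp⟩
      have hi' : i + 1 < L.length := by omega
      have hcase := swap_hit L j i hj hne hi' (by simpa [is_symmetric] using hp)
      refine ⟨(i : Int), ⟨?_, by constructor <;> omega⟩, ?_⟩
      · simp only [List.mem_cons]
        rcases hcase with ⟨h1, h2⟩ | h | h | h
        · left; omega
        · right; left; omega
        · right; right; left; omega
        · right; right; right; left; omega
      · have : (i : Int).toNat = i := Int.toNat_natCast i
        rw [this, ← swap_eq_palSwapList L i hi']
        simpa [is_symmetric] using hp
    · rintro ⟨c, ⟨_, hc0, hc2⟩, hq⟩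
      have hn2 : 2 ≤ L.length := by omega
      refine ⟨c.toNat, by omega, ?_⟩
      have hr : c.toNat + 1 < L.length := by omega
      rw [swap_eq_palSwapList L c.toNat hr]
      simpa [is_symmetric] using hq

-- ===== VERDICT (by name: the statement is the Claim_ definition above) =====
theorem almost_symmetric_spec : Claim_equal_almost_symmetric := by
  intro L _
  unfold Spec_almost_symmetric
  exact almost_symmetric_spec' L
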